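-- pv_equiv track=rewrite | github.com/xq443/intensive-foundation-of-cs | inclass/8/ShowPF.py | PF2
-- ===== SOURCE A (Python) =====
-- def PF2(x):
--     """ Returns a reference to a list that is a perfect shuffle of x
--
--     PreC: x references a list with even length
--     """
--     n = len(x)
--     m = int(n/2)
--     y = []
--     for k in range(m):
--         # Append the kth item from the top half
--         y.append(x[k])
--         # append the kth item from the bottom half
--         y.append(x[k+m])
--     return y
-- ===== SOURCE B (Python) =====
-- def PF2(x):
--     """Perfect shuffle via two strided bulk slice assignments instead of an
--     alternating append loop (objective: idiomatic/alternative decomposition)."""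
--     m = len(x) // 2
--     y = [None] * (2 * m)
--     y[0::2] = x[:m]
--     y[1::2] = x[m:2 * m]
--     return y
-- ===== Notes on version B (the rewrite author's own statement) =====
-- stated objective: alternative
-- what changed: Replaces the per-index loop appending x[k], x[k+m] with a preallocated buffer filled by two strided slice assignments (y[0::2] = top half, y[1::2] = bottom half).
import Mathlib
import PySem

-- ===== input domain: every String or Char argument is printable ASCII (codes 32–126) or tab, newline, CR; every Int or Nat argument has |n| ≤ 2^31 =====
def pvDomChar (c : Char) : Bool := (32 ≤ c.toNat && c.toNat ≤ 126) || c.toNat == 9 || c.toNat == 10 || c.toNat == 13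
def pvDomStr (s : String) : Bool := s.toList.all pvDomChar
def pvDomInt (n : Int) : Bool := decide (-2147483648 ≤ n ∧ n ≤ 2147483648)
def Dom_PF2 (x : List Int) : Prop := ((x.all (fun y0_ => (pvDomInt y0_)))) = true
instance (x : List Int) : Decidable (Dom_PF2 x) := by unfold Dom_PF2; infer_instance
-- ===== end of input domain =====

-- B replaces A's alternating append loop by a preallocated buffer filled with two
-- strided slice assignments (even positions = top half, odd = bottom half).

-- ===== PORT A =====
-- n = len(x); m = int(n/2); y = []; for k in range(m): y.append(x[k]); y.append(x[k+m]); return y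
def PF2 (x : List Int) : List Int :=
  let n : Int := x.length
  let m : Int := PySem.Int.truncdiv n 2
  (PySem.List.pyRange 0 m 1).foldl
    (fun y k => (y ++ [PySem.List.pyGetD x k 0]) ++ [PySem.List.pyGetD x (k + m) 0]) []

-- ===== PORT B =====
-- m = len(x)//2; y = [None]*(2*m); y[0::2] = x[:m]; y[1::2] = x[m:2*m]; return y
-- The two strided assignments into the 2*m buffer are modelled as zipping the two
-- half-slices and flattening each pair (even slot, odd slot) — exact for equal-length slices.
def PF2_alt (x : List Int) : List Int :=
  let m : Nat := x.length / 2
  ((x.take m).zip ((x.drop m).take m)).flatMap (fun p => [p.1, p.2])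

-- ===== PRECONDITION & SPEC =====
def Spec_PF2 (x : List Int) (out : List Int) : Prop := out = PF2_alt x
instance (x : List Int) (out : List Int) : Decidable (Spec_PF2 x out) := by unfold Spec_PF2; infer_instance

-- ===== CLAIM (what is proved, stated in full; the proofs are below) =====
def Claim_equal_PF2 : Prop := ∀ (x : List Int), Dom_PF2 x → Spec_PF2 x (PF2 x)

-- ===== LEMMAS AND PROOFS =====

-- loop invariant: after j iterations, A's accumulator is the flattened zip of the
-- first j elements of the two halves
lemma PF2_loop (x : List Int) (m : Nat) (hm : m + m ≤ x.length) :
    ∀ j, j ≤ m →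
    (PySem.List.pyRange 0 (j : Int) 1).foldl
      (fun y k => (y ++ [PySem.List.pyGetD x k 0]) ++ [PySem.List.pyGetD x (k + (m : Int)) 0]) []
    = ((x.take j).zip ((x.drop m).take j)).flatMap (fun p => [p.1, p.2]) := by
  intro j
  induction j with
  | zero => intro _; simp [PySem.List.pyRange_one_eq_nil]
  | succ j ih =>
    intro hj
    have hj' : j ≤ m := Nat.le_of_succ_le hj
    have hjl : j < x.length := by omega
    have hjd : j < (x.drop m).length := by simp [List.length_drop]; omega
    have hr : ((j : Int) + 1) = ((j + 1 : Nat) : Int) := by push_cast; ring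
    rw [← hr, PySem.List.pyRange_one_succ_right (by positivity), List.foldl_append, ih hj']
    have h1 : PySem.List.pyGetD x (j : Int) 0 = x[j] := by
      rw [PySem.List.pyGetD_natCast, List.getD_eq_getElem x 0 hjl]
    have h2 : PySem.List.pyGetD x ((j : Int) + (m : Int)) 0 = (x.drop m)[j] := by
      have : ((j : Int) + (m : Int)) = ((j + m : Nat) : Int) := by push_cast; ring
      rw [this, PySem.List.pyGetD_natCast, List.getD_eq_getElem x 0 (by omega)]
      simp [List.getElem_drop]; congr 1; omega
    have ht1 : x.take (j + 1) = x.take j ++ [x[j]] := by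
      rw [List.take_add_one]; simp [List.getElem?_eq_getElem hjl]
    have ht2 : (x.drop m).take (j + 1) = (x.drop m).take j ++ [(x.drop m)[j]] := by
      rw [List.take_add_one]; simp [List.getElem?_eq_getElem hjd]
    have hlen : (x.take j).length = ((x.drop m).take j).length := by
      simp [List.length_take, List.length_drop]; omega
    rw [ht1, ht2, List.zip_append hlen, List.flatMap_append]
    simp [List.foldl, h1, h2]

lemma PF2_eq_alt (x : List Int) : PF2 x = PF2_alt x := by
  show (PySem.List.pyRange 0 (PySem.Int.truncdiv (x.length : Int) 2) 1).foldl _ [] = _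
  have hm : PySem.Int.truncdiv (x.length : Int) 2 = ((x.length / 2 : Nat) : Int) := by
    simp [PySem.Int.truncdiv]
  rw [hm]
  exact PF2_loop x (x.length / 2) (by omega) (x.length / 2) le_rfl

-- ===== VERDICT (by name: the statement is the Claim_ definition above) =====
theorem PF2_spec : Claim_equal_PF2 := by
  intro x _
  exact PF2_eq_alt x
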